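-- pv_equiv track=rewrite | github.com/Justin21523/news-information-retrieval-system | scripts/crawlers/cna_spider.py | extract_category_from_url
-- ===== SOURCE A (Python) =====
-- def extract_category_from_url(url: str) -> str:
--     """
--     Extract category from URL.
--
--     Args:
--         url: Article URL
--
--     Returns:
--         Category name
--     """
--     # CNA URL structure: /news/CATEGORY/YYYYMMDDXXXXXX.aspx
--     category_map = {
--         'aipl': '政治',
--         'aie': '財經',
--         'ait': '科技',
--         'asoc': '社會',
--         'aopl': '國際',
--         'ahel': '生活',
--         'acul': '文化',
--         'aspt': '運動',
--     }
--
--     for code, name in category_map.items():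
--         if f'/news/{code}/' in url:
--             return name
--
--     return '其他'
-- ===== SOURCE B (Python) =====
-- def extract_category_from_url(url: str) -> str:
--     """Extract category from URL: single scan collecting '/news/<seg>/' segments, then one priority lookup."""
--     category_map = {
--         'aipl': '政治',
--         'aie': '財經',
--         'ait': '科技',
--         'asoc': '社會',
--         'aopl': '國際',
--         'ahel': '生活',
--         'acul': '文化',
--         'aspt': '運動',
--     }
--     segments = set()
--     for i in range(len(url)):
--         if url[i:i + 6] == '/news/':
--             j = url.find('/', i + 6)
--             if j != -1:
--                 segments.add(url[i + 6:j])
--     for code, name in category_map.items():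
--         if code in segments:
--             return name
--     return '其他'
-- ===== Notes on version B (the rewrite author's own statement) =====
-- stated objective: alternative
-- what changed: Instead of A's eight separate substring scans (one per category code), B makes a single left-to-right pass over the URL collecting each slash-delimited segment that follows a news marker into a set, then does one priority lookup over the category map.
import Mathlib
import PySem

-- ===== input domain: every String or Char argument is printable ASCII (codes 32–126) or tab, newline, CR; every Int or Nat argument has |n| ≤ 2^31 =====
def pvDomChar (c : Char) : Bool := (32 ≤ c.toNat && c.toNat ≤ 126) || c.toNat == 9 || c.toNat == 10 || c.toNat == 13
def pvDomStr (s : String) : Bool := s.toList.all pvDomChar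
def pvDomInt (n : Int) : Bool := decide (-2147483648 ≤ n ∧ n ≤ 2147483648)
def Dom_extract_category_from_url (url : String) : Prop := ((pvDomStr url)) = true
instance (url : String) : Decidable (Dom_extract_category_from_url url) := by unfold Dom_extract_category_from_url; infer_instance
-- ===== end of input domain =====

-- B replaces A's eight substring scans by one left-to-right scan that collects every '/news/<seg>/'
-- segment into a set, followed by a single priority lookup (objective: alternative/idiomatic).

-- ===== PORT A =====
-- the f-string '/news/{code}/' as a list of code points
def pvNews6 : List Char := ['/', 'n', 'e', 'w', 's', '/']

-- the category_map dict, in insertion order (codes as List Char, names as String)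
def pvCatMap : List (List Char × String) :=
  [(['a','i','p','l'], "政治"), (['a','i','e'], "財經"), (['a','i','t'], "科技"),
   (['a','s','o','c'], "社會"), (['a','o','p','l'], "國際"), (['a','h','e','l'], "生活"),
   (['a','c','u','l'], "文化"), (['a','s','p','t'], "運動")]

-- A's loop: for code, name in category_map.items(): if f'/news/{code}/' in url: return name
def pvALoop (m : List (List Char × String)) (u : List Char) : String :=
  match m with
  | [] => "其他"
  | (code, name) :: rest =>
      if PySem.Chars.isIn (pvNews6 ++ (code ++ ['/'])) u then name else pvALoop rest u

def extract_category_from_url (url : String) : String := pvALoop pvCatMap url.toList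

-- ===== PORT B =====
-- loop body of B's scan: if url[i:i+6] == '/news/': j = url.find('/', i+6); if j != -1: yield url[i+6:j]
def pvSegAt (u : List Char) (i : Int) : Option (List Char) :=
  if PySem.List.slice u (some i) (some (i + 6)) = pvNews6 then
    if PySem.Chars.findFrom u ['/'] (i + 6) none ≠ -1 then
      some (PySem.List.slice u (some (i + 6)) (some (PySem.Chars.findFrom u ['/'] (i + 6) none)))
    else none
  else none

-- segments = set(); for i in range(len(url)): … segments.add(…)
def pvSegs (u : List Char) : PySem.Set (List Char) :=
  (PySem.List.pyRange 0 (u.length : Int) 1).foldl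
    (fun s i => match pvSegAt u i with
                | some seg => PySem.Set.add s seg
                | none => s)
    PySem.Set.empty

-- for code, name in category_map.items(): if code in segments: return name
def pvBLoop (m : List (List Char × String)) (s : PySem.Set (List Char)) : String :=
  match m with
  | [] => "其他"
  | (code, name) :: rest => if code ∈ s then name else pvBLoop rest s

def extract_category_from_url_alt (url : String) : String :=
  pvBLoop pvCatMap (pvSegs url.toList)

-- ===== PRECONDITION & SPEC =====
def Spec_extract_category_from_url (url : String) (out : String) : Prop := out = extract_category_from_url_alt url
instance (url : String) (out : String) : Decidable (Spec_extract_category_from_url url out) := by unfold Spec_extract_category_from_url; infer_instance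

-- ===== CLAIM (what is proved, stated in full; the proofs are below) =====
def Claim_equal_extract_category_from_url : Prop := ∀ (url : String), Dom_extract_category_from_url url → Spec_extract_category_from_url url (extract_category_from_url url)

-- ===== LEMMAS AND PROOFS =====

lemma pvSingletonPrefix {a : Char} {xs : List Char} : [a] <+: xs ↔ xs.head? = some a := by
  constructor
  · rintro ⟨t, rfl⟩; rfl
  · intro h
    cases xs with
    | nil => simp at h
    | cons b t => simp at h; subst h; exact ⟨t, rfl⟩

-- the first '/' of c ++ '/' :: t sits right after c when c is slash-free
lemma pvFindSlash (c t : List Char) (hc : ('/' : Char) ∉ c) :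
    PySem.Chars.find (c ++ '/' :: t) ['/'] = (c.length : Int) := by
  have hmem : ('/' : Char) ∈ c ++ '/' :: t := by simp
  have hge : 0 ≤ PySem.Chars.find (c ++ '/' :: t) ['/'] :=
    (PySem.Chars.find_nonneg_iff _ _).mpr ((List.singleton_infix_iff _ _).mpr hmem)
  obtain ⟨hpre, hmin⟩ := PySem.Chars.find_spec hge
  set g := (PySem.Chars.find (c ++ '/' :: t) ['/']).toNat with hg
  have h1 : ¬ c.length < g := by
    intro hlt
    exact hmin _ hlt (by rw [List.drop_left' rfl]; exact ⟨t, rfl⟩)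
  have h2 : ¬ g < c.length := by
    intro hlt
    have hhd := pvSingletonPrefix.mp hpre
    rw [List.head?_drop, List.getElem?_append_left hlt] at hhd
    exact hc (List.mem_of_getElem? hhd)
  omega

-- membership in B's fold that adds each produced segment
lemma pvMemFold (u : List Char) (l : List Int) (s0 : PySem.Set (List Char)) (x : List Char) :
    x ∈ l.foldl (fun s i => match pvSegAt u i with
                            | some seg => PySem.Set.add s seg
                            | none => s) s0
      ↔ x ∈ s0 ∨ ∃ i ∈ l, pvSegAt u i = some x := by
  induction l generalizing s0 with
  | nil => simp
  | cons i l ih =>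
    rw [List.foldl_cons]
    cases h : pvSegAt u i with
    | none => rw [ih]; simp [h]
    | some seg => rw [ih]; simp [PySem.Set.mem_add, h]; tauto

-- the scan produces code at position k exactly when '/news/<code>/' starts there
lemma pvSegAt_iff (u code : List Char) (k : Nat) (hc : ('/' : Char) ∉ code) :
    pvSegAt u (k : Int) = some code ↔ (pvNews6 ++ (code ++ ['/'])) <+: u.drop k := by
  have e6 : (k : Int) + 6 = ((k + 6 : Nat) : Int) := by push_cast; ring
  constructor
  · intro h
    unfold pvSegAt at h
    split at h
    next hs =>
      split at h
      next hj =>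
        rw [e6, PySem.List.slice_natCast] at hs
        have hs' : (u.drop k).take 6 = pvNews6 := by
          rwa [Nat.add_sub_cancel_left] at hs
        have h6 : k + 6 ≤ u.length := by
          have := congrArg List.length hs'
          simp [pvNews6] at this
          omega
        have hdk : u.drop k = pvNews6 ++ u.drop (k + 6) := by
          conv_lhs => rw [← List.take_append_drop 6 (u.drop k)]
          rw [hs', List.drop_drop]
        rw [e6] at h hj
        rw [PySem.Chars.findFrom_natCast u ['/'] (k + 6) h6] at h hj
        set f := PySem.Chars.find (u.drop (k + 6)) ['/'] with hf
        have hfne : ¬ f = -1 := by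
          intro hfe; rw [if_pos hfe] at hj; exact hj rfl
        rw [if_neg hfne] at h
        have hf0 : 0 ≤ f := by
          have := PySem.Chars.neg_one_le_find (u.drop (k + 6)) ['/']
          omega
        obtain ⟨hpre, _⟩ := PySem.Chars.find_spec hf0
        obtain ⟨tl, htl⟩ : ∃ tl, (u.drop (k + 6)).drop f.toNat = '/' :: tl := by
          have hh := pvSingletonPrefix.mp hpre
          cases hq : (u.drop (k + 6)).drop f.toNat with
          | nil => rw [hq] at hh; simp at hh
          | cons a tl => rw [hq] at hh; simp at hh; subst hh; exact ⟨tl, rfl⟩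
        have ef : ((k + 6 : Nat) : Int) + f = (((k + 6) + f.toNat : Nat) : Int) := by
          push_cast; omega
        rw [ef, PySem.List.slice_natCast, Nat.add_sub_cancel_left] at h
        have hcode : (u.drop (k + 6)).take f.toNat = code := Option.some_inj.mp h
        refine ⟨tl, ?_⟩
        rw [hdk, ← hcode]
        conv_rhs => rw [← List.take_append_drop f.toNat (u.drop (k + 6))]
        rw [htl]
        simp
      next => exact absurd h (by simp)
    next => exact absurd h (by simp)
  · rintro ⟨t, ht⟩
    have heq : u.drop k = pvNews6 ++ (code ++ '/' :: t) := by
      rw [← ht]; simp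
    have hlen := congrArg List.length heq
    simp [pvNews6] at hlen
    have hk : k ≤ u.length := by
      by_contra hk
      have hnil : u.drop k = [] := List.drop_eq_nil_of_le (by omega)
      rw [hnil] at heq; simp at heq
    have h6 : k + 6 ≤ u.length := by omega
    have hd6 : u.drop (k + 6) = code ++ '/' :: t := by
      rw [← List.drop_drop, heq, List.drop_left' (by simp [pvNews6])]
    unfold pvSegAt
    rw [e6, PySem.List.slice_natCast, Nat.add_sub_cancel_left, heq,
      List.take_left' (by simp [pvNews6])]
    rw [if_pos rfl]
    rw [PySem.Chars.findFrom_natCast u ['/'] (k + 6) h6, hd6, pvFindSlash code t hc]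
    rw [if_neg (by omega : ¬ (code.length : Int) = -1)]
    rw [if_pos (by push_cast; omega : ((k + 6 : Nat) : Int) + (code.length : Int) ≠ -1)]
    rw [show ((k + 6 : Nat) : Int) + (code.length : Int) = (((k + 6) + code.length : Nat) : Int)
      by push_cast; ring]
    rw [PySem.List.slice_natCast, Nat.add_sub_cancel_left, hd6, List.take_left' rfl]

lemma pvSegs_mem (u code : List Char) (hc : ('/' : Char) ∉ code) :
    code ∈ pvSegs u ↔ ∃ k : Nat, k < u.length ∧ (pvNews6 ++ (code ++ ['/'])) <+: u.drop k := by
  unfold pvSegs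
  rw [pvMemFold]
  simp only [PySem.Set.empty]
  constructor
  · rintro (h | ⟨i, hi, hseg⟩)
    · simp at h
    · rw [PySem.List.mem_pyRange_one] at hi
      obtain ⟨h0, hlt⟩ := hi
      refine ⟨i.toNat, by omega, ?_⟩
      rw [← pvSegAt_iff u code i.toNat hc]
      rwa [show ((i.toNat : Nat) : Int) = i by omega]
  · rintro ⟨k, hk, hpre⟩
    refine Or.inr ⟨(k : Int), ?_, ?_⟩
    · rw [PySem.List.mem_pyRange_one]; omega
    · exact (pvSegAt_iff u code k hc).mpr hpre

lemma pvIsIn_iff (u code : List Char) (hc : ('/' : Char) ∉ code) :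
    PySem.Chars.isIn (pvNews6 ++ (code ++ ['/'])) u = true ↔ code ∈ pvSegs u := by
  rw [← PySem.Chars.exists_prefix_drop_iff_isIn, pvSegs_mem u code hc]
  constructor
  · rintro ⟨j, hj⟩
    refine ⟨j, ?_, hj⟩
    by_contra hge
    have : u.drop j = [] := List.drop_eq_nil_of_le (by omega)
    rw [this] at hj
    obtain ⟨t, ht⟩ := hj
    simp [pvNews6] at ht
  · rintro ⟨k, _, hk⟩
    exact ⟨k, hk⟩

lemma pvLoops (m : List (List Char × String)) (u : List Char)
    (h : ∀ p ∈ m, ('/' : Char) ∉ p.1) :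
    pvALoop m u = pvBLoop m (pvSegs u) := by
  induction m with
  | nil => rfl
  | cons p rest ih =>
    obtain ⟨code, name⟩ := p
    have hc : ('/' : Char) ∉ code := h (code, name) (by simp)
    by_cases hmem : code ∈ pvSegs u
    · have hb : PySem.Chars.isIn (pvNews6 ++ (code ++ ['/'])) u = true :=
        (pvIsIn_iff u code hc).mpr hmem
      simp [pvALoop, pvBLoop, hb, hmem]
    · have hb : PySem.Chars.isIn (pvNews6 ++ (code ++ ['/'])) u = false := by
        rw [Bool.eq_false_iff]
        intro ht; exact hmem ((pvIsIn_iff u code hc).mp ht)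
      simp [pvALoop, pvBLoop, hb, hmem]
      exact ih (fun p hp => h p (List.mem_cons_of_mem _ hp))

-- ===== VERDICT (by name: the statement is the Claim_ definition above) =====
theorem extract_category_from_url_spec : Claim_equal_extract_category_from_url := by
  intro url _
  unfold Spec_extract_category_from_url extract_category_from_url extract_category_from_url_alt
  exact pvLoops pvCatMap url.toList (by decide)
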